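-- pv_equiv track=rewrite | github.com/AprajitaChhawi/365DaysOfCode.JULY | Day 29 modified string.py | modified
-- ===== SOURCE A (Python) =====
-- def modified(s):
--     count=0
--     n=len(s)
--     i=0
--     while(i<n-2):
--         if s[i]==s[i+1] and s[i+1]==s[i+2]:
--             i=i+2
--             count=count+1
--         else:
--             i=i+1
--     return count
-- ===== SOURCE B (Python) =====
-- def modified(s):
--     # run-length decomposition: each maximal run of length L contributes (L-1)//2
--     if not s:
--         return 0
--     total = 0
--     prev = s[0]
--     run = 1
--     for ch in s[1:]:
--         if ch == prev:
--             run += 1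
--         else:
--             total += (run - 1) // 2
--             prev, run = ch, 1
--     return total + (run - 1) // 2
-- ===== Notes on version B (the rewrite author's own statement) =====
-- stated objective: alternative
-- what changed: Replaces A's greedy index-jumping while loop (jump 2 on a triple, else 1) with a single run-length pass that adds (run-1)//2 for each maximal run of equal characters (single cheap pass per char instead of repeated triple comparisons and index arithmetic).
import Mathlib
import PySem

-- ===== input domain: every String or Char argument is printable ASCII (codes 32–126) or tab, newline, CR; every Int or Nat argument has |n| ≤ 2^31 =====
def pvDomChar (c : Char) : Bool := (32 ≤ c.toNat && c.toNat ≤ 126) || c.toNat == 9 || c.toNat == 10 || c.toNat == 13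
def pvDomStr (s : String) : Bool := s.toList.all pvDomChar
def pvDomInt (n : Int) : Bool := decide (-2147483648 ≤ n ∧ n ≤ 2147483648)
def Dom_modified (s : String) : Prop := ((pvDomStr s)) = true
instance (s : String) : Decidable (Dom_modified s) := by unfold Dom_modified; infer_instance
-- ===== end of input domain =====

-- B replaces A's greedy index-jumping scan with a run-length pass summing (run-1)//2 per maximal run (objective: alternative/idiomatic; same O(n) cost).

-- ===== PORT A =====
-- while(i<n-2): the loop index i starts at 0 and only increases, so it is kept as a Nat;
-- 'i < n - 2' with Nat truncated subtraction agrees with Python's int comparison for i ≥ 0, n ≥ 0.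
-- s[i] is in range whenever read (i+2 ≤ n-1), ported as the optional lookup cs[i]? compared on Option.
def loopA (cs : List Char) (i : Nat) (count : Int) : Int :=
  if i < cs.length - 2 then
    if cs[i]? = cs[i+1]? ∧ cs[i+1]? = cs[i+2]? then
      loopA cs (i+2) (count+1)
    else
      loopA cs (i+1) count
  else count
termination_by cs.length - i
decreasing_by all_goals omega

def modified (s : String) : Int := loopA s.toList 0 0

-- ===== PORT B =====
-- goB is Source B's for-loop: state (prev, run, total); at a run break add (run-1)//2 and restart.
def goB : List Char → Char → Nat → Int → Int
  | [], _, run, total => total + PySem.Int.floordiv ((run : Int) - 1) 2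
  | ch :: rest, prev, run, total =>
      if ch = prev then goB rest prev (run+1) total
      else goB rest ch 1 (total + PySem.Int.floordiv ((run : Int) - 1) 2)

def modified_alt (s : String) : Int :=
  match s.toList with
  | [] => 0
  | c :: rest => goB rest c 1 0

-- ===== PRECONDITION & SPEC =====
def Spec_modified (s : String) (out : Int) : Prop := out = modified_alt s
instance (s : String) (out : Int) : Decidable (Spec_modified s out) := by unfold Spec_modified; infer_instance

-- ===== CLAIM (what is proved, stated in full; the proofs are below) =====
def Claim_equal_modified : Prop := ∀ (s : String), Dom_modified s → Spec_modified s (modified s)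

-- ===== LEMMAS AND PROOFS =====

-- A's loop rewritten on the suffix it still scans.
def loopL : List Char → Int
  | [] => 0
  | [_] => 0
  | [_, _] => 0
  | a :: b :: c :: rest => if a = b ∧ b = c then 1 + loopL (c :: rest) else loopL (b :: c :: rest)
termination_by l => l.length
decreasing_by all_goals (simp; try omega)

theorem loopL_cons3 (a b c : Char) (rest : List Char) :
    loopL (a :: b :: c :: rest) = if a = b ∧ b = c then 1 + loopL (c :: rest) else loopL (b :: c :: rest) := by
  rw [loopL]

theorem loopL_ne (b c : Char) (rest : List Char) (h : ¬ b = c) :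
    loopL (b :: c :: rest) = loopL (c :: rest) := by
  cases rest with
  | nil => rw [loopL, loopL]
  | cons d r => rw [loopL_cons3, if_neg (fun hc => h hc.1)]

theorem loopL_short (l : List Char) (h : l.length ≤ 2) : loopL l = 0 := by
  match l with
  | [] => rw [loopL]
  | [_] => rw [loopL]
  | [_, _] => rw [loopL]
  | _ :: _ :: _ :: _ => simp at h

theorem loopA_eq (cs : List Char) (i : Nat) (count : Int) :
    loopA cs i count = count + loopL (cs.drop i) := by
  rw [loopA]
  by_cases h : i < cs.length - 2
  · have h0 : i < cs.length := by omega
    have h1 : i + 1 < cs.length := by omega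
    have h2 : i + 2 < cs.length := by omega
    have e0 : cs.drop i = cs[i] :: cs.drop (i+1) := List.drop_eq_getElem_cons h0
    have e1 : cs.drop (i+1) = cs[i+1] :: cs.drop (i+2) := List.drop_eq_getElem_cons h1
    have e2 : cs.drop (i+2) = cs[i+2] :: cs.drop (i+3) := List.drop_eq_getElem_cons h2
    rw [if_pos h, e0, e1, e2, loopL_cons3]
    simp only [List.getElem?_eq_getElem h0, List.getElem?_eq_getElem h1,
      List.getElem?_eq_getElem h2, Option.some.injEq]
    split_ifs with hc
    · rw [loopA_eq cs (i+2) (count+1), e2]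
      ring
    · rw [loopA_eq cs (i+1) count, e1, e2]
  · rw [if_neg h]
    rw [loopL_short _ (by simp; omega)]
    ring
termination_by cs.length - i

def fB (k : Nat) : Int := PySem.Int.floordiv ((k : Int) - 1) 2

-- (k-1)//2 steps by 1 when k grows by 2, for k ≥ 1.
theorem f_step (k : Nat) (_hk : 1 ≤ k) : fB (k + 2) = 1 + fB k := by
  have two_pos : (0:Int) < 2 := by norm_num
  rw [fB, fB, PySem.Int.floordiv_eq_ediv_of_pos two_pos, PySem.Int.floordiv_eq_ediv_of_pos two_pos]
  push_cast
  omega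

theorem f_one : fB 1 = 0 := by decide

theorem f_two : fB 2 = 0 := by decide

-- shifting the accumulator out of goB
theorem goB_acc (rest : List Char) (c : Char) (k : Nat) (x y : Int) :
    goB rest c k (x + y) = y + goB rest c k x := by
  induction rest generalizing c k x with
  | nil => simp only [goB]; ring
  | cons d rest ih =>
    rw [goB, goB]
    split_ifs with hd
    · exact ih c (k+1) x
    · rw [add_right_comm x y, ih d 1]

-- a run longer by 2 contributes exactly one more triple
theorem goB_step2 (rest : List Char) (c : Char) (k : Nat) (hk : 1 ≤ k) (total : Int) :
    goB rest c (k + 2) total = 1 + goB rest c k total := by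
  induction rest generalizing c k total with
  | nil =>
    show total + fB (k+2) = 1 + (total + fB k)
    rw [f_step k hk]; ring
  | cons d rest ih =>
    show (if d = c then goB rest c (k+2+1) total else goB rest d 1 (total + fB (k+2)))
        = 1 + (if d = c then goB rest c (k+1) total else goB rest d 1 (total + fB k))
    split_ifs with hd
    · exact ih c (k+1) (by omega) total
    · rw [f_step k hk, show total + (1 + fB k) = (total + fB k) + 1 by ring, goB_acc]

-- Source B's pass, on a char list
def altL : List Char → Int
  | [] => 0
  | c :: rest => goB rest c 1 0

theorem key (cs : List Char) : loopL cs = altL cs := by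
  match cs with
  | [] => rw [loopL]; rfl
  | [a] =>
    rw [loopL]
    show (0:Int) = 0 + fB 1
    rw [f_one]; ring
  | [a, b] =>
    rw [loopL]
    show (0:Int) = if b = a then goB [] a (1+1) 0 else goB [] b 1 (0 + fB 1)
    split_ifs with h
    · show (0:Int) = 0 + fB 2
      rw [f_two]; ring
    · show (0:Int) = 0 + fB 1 + fB 1
      rw [f_one]; ring
  | a :: b :: c :: rest =>
    have ih1 := key (b :: c :: rest)
    have ih2 := key (c :: rest)
    rw [loopL_cons3]
    show _ = if b = a then goB (c :: rest) a (1+1) 0 else goB (c :: rest) b 1 (0 + fB 1)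
    by_cases hab : b = a
    · subst hab
      rw [if_pos rfl]
      show _ = if c = b then goB rest b (1+1+1) 0 else goB rest c 1 (0 + fB (1+1))
      by_cases hbc : c = b
      · subst hbc
        rw [if_pos ⟨rfl, rfl⟩, if_pos rfl, ih2]
        show 1 + altL (c :: rest) = goB rest c (1 + 1 + 1) 0
        show 1 + goB rest c 1 0 = goB rest c (1 + 1 + 1) 0
        rw [show (1+1+1 : Nat) = 1 + 2 from rfl, goB_step2 rest c 1 le_rfl 0]
      · rw [if_neg (by exact fun hc => hbc hc.2.symm), if_neg hbc,
          loopL_ne b c rest (fun hc => hbc hc.symm), ih2]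
        show goB rest c 1 0 = goB rest c 1 (0 + fB (1+1))
        rw [show (1+1 : Nat) = 2 from rfl, f_two, add_zero]
    · rw [if_neg (by exact fun hc => hab hc.1.symm), ih1, if_neg hab]
      show goB (c :: rest) b 1 0 = goB (c :: rest) b 1 (0 + fB 1)
      rw [f_one, add_zero]
termination_by cs.length
decreasing_by all_goals (simp; try omega)

theorem alt_eq (s : String) : modified_alt s = altL s.toList := by
  cases h : s.toList <;> simp [modified_alt, altL, h]

-- ===== VERDICT (by name: the statement is the Claim_ definition above) =====
theorem modified_spec : Claim_equal_modified := by
  intro s _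
  show modified s = modified_alt s
  rw [modified, loopA_eq, List.drop_zero, zero_add, key, alt_eq]
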